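-- pv_equiv track=rewrite | github.com/jdolivet/NSI-Projets | Premiere/2022/Projet-2/Cryptographie/Code.py | decalage_vigenere
-- ===== SOURCE A (Python) =====
-- def decalage_vigenere(i, idx):
--     """ Fonction qui décale la lettre selon la lettre de la clé """
--     let = ord(i.upper()) #met la lettre en majuscule
--     let += idx
--     while let > 90:
--         let -= 26
--     while let < 65:
--         let += 26
--     return chr(let)
-- ===== SOURCE B (Python) =====
-- def decalage_vigenere(i, idx):
--     """ Fonction qui décale la lettre selon la lettre de la clé """
--     return chr(65 + (ord(i.upper()) + idx - 65) % 26)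
-- ===== Notes on version B (the rewrite author's own statement) =====
-- stated objective: simpler
-- what changed: The two wrap-around while loops are replaced by a single closed-form flooring-modulo computation 65 + (ord(i.upper()) + idx - 65) % 26.
import Mathlib
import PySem

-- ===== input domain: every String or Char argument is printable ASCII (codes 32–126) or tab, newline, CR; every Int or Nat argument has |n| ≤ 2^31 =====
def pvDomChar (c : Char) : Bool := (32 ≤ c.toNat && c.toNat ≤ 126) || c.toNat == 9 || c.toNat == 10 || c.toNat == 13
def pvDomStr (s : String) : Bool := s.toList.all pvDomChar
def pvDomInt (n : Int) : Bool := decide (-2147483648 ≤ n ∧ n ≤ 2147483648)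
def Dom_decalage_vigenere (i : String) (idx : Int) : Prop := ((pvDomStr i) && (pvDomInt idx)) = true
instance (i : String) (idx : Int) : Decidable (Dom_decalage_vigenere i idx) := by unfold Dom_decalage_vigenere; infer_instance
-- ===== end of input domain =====

-- B replaces A's two wrap-around while loops by one closed-form flooring-modulo step (simpler).


-- ===== PORT A =====
-- while let > 90: let -= 26
def pvWhileDown (l : Int) : Int :=
  if 90 < l then pvWhileDown (l - 26) else l
termination_by (l - 90).toNat
decreasing_by omega

-- while let < 65: let += 26
def pvWhileUp (l : Int) : Int :=
  if l < 65 then pvWhileUp (l + 26) else l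
termination_by (65 - l).toNat
decreasing_by omega

def decalage_vigenere (i : String) (idx : Int) : String :=
  match (PySem.Str.upper i).toList with
  | [c] => String.ofList [Char.ofNat (pvWhileUp (pvWhileDown ((c.toNat : Int) + idx))).toNat]
  | _ => ""  -- ord(i.upper()) raises TypeError: outside Pre_

-- ===== PORT B =====
def decalage_vigenere_alt (i : String) (idx : Int) : String :=
  let u := (PySem.Str.upper i).toList
  if u.length = 1 then
    String.ofList [Char.ofNat (65 + PySem.Int.mod ((u.headI.toNat : Int) + idx - 65) 26).toNat]
  else ""  -- ord(i.upper()) raises TypeError: outside Pre_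

-- ===== PRECONDITION & SPEC =====
-- A raises TypeError unless i is exactly one character (ord needs a length-1 string).
def Pre_decalage_vigenere (i : String) (_idx : Int) : Prop := i.toList.length = 1
instance (i : String) (idx : Int) : Decidable (Pre_decalage_vigenere i idx) := by unfold Pre_decalage_vigenere; infer_instance
def pvWitness_decalage_vigenere : String × Int := ("a", 3)
def Spec_decalage_vigenere (i : String) (idx : Int) (out : String) : Prop := out = decalage_vigenere_alt i idx
instance (i : String) (idx : Int) (out : String) : Decidable (Spec_decalage_vigenere i idx out) := by unfold Spec_decalage_vigenere; infer_instance

-- ===== CLAIM (what is proved, stated in full; the proofs are below) =====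
def Claim_equal_decalage_vigenere : Prop := ∀ (i : String) (idx : Int), Dom_decalage_vigenere i idx → Pre_decalage_vigenere i idx → Spec_decalage_vigenere i idx (decalage_vigenere i idx)

-- ===== LEMMAS AND PROOFS =====
lemma pvWhileDown_lt (l : Int) : pvWhileDown l < 91 ∧ (pvWhileDown l - 65) % 26 = (l - 65) % 26 := by
  induction l using pvWhileDown.induct with
  | case1 l h ih =>
      rw [pvWhileDown, if_pos h]
      exact ⟨ih.1, by rw [ih.2]; omega⟩
  | case2 l h =>
      rw [pvWhileDown, if_neg h]
      exact ⟨by omega, rfl⟩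

lemma pvWhileUp_eq (l : Int) (hl : l < 91) : pvWhileUp l = 65 + (l - 65) % 26 := by
  induction l using pvWhileUp.induct with
  | case1 l h ih =>
      rw [pvWhileUp, if_pos h, ih (by omega)]
      omega
  | case2 l h =>
      rw [pvWhileUp, if_neg h]
      omega

lemma pvLoops_eq_mod (l : Int) : pvWhileUp (pvWhileDown l) = 65 + (l - 65) % 26 := by
  obtain ⟨h1, h2⟩ := pvWhileDown_lt l
  rw [pvWhileUp_eq _ h1, h2]

-- ===== VERDICT (by name: the statement is the Claim_ definition above) =====
theorem decalage_vigenere_spec : Claim_equal_decalage_vigenere := by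
  intro i idx _ _
  unfold Spec_decalage_vigenere decalage_vigenere decalage_vigenere_alt
  cases h : (PySem.Str.upper i).toList with
  | nil => simp
  | cons c t =>
    cases t with
    | nil => simp [pvLoops_eq_mod]
    | cons _ _ => simp
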